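-- pv_equiv track=rewrite | github.com/VoodooChild99/perry | synthesizer/synthesizer.py | __set_field
-- ===== SOURCE A (Python) =====
-- def __set_field(obj, field, value) -> str:
--   offset = field[0]
--   start_bit = field[1]
--   num_bits = field[2]
--   body = '((uint8_t*)(&{}))'.format(obj)
--   bit_length = num_bits + start_bit
--   if bit_length <= 32:
--     bit_length = 32
--   if offset > 0:
--     body = '*((uint{}_t*)({} + {}))'.format(bit_length, body, offset)
--   else:
--     body = '*((uint{}_t*)({}))'.format(bit_length, body, offset)
--   tmp = ''
--   if num_bits > 0 and num_bits < 32: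
--     mask = 0
--     for i in range(num_bits):
--       mask |= (1 << i)
--     tmp = '({} & {})'.format(value, hex(mask))
--   elif num_bits == 32:
--     tmp = '({})'.format(value)
--   if start_bit > 0:
--     tmp = '({} << {})'.format(tmp, start_bit)
--   zero_expr = '(~({} << {}))'.format(hex(mask), start_bit)
--   return '{0} &= {1}; {0} |= {2}'.format(body, zero_expr, tmp)
-- ===== SOURCE B (Python) =====
-- def __set_field(obj, field, value) -> str:
--   offset, start_bit, num_bits = field
--   width = max(32, start_bit + num_bits)
--   lvalue = '*((uint{}_t*)(((uint8_t*)(&{})){}))'.format(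
--       width, obj, ' + {}'.format(offset) if offset > 0 else '')
--   # hex literal of the all-ones field mask, built directly as text: a leading
--   # partial nibble from {'', '1', '3', '7'} followed by num_bits // 4 'f' nibbles
--   mask_hex = '0x' + ('', '1', '3', '7')[num_bits % 4] + 'f' * (num_bits // 4)
--   rhs = '({} & {})'.format(value, mask_hex)
--   if start_bit > 0:
--     rhs = '({} << {})'.format(rhs, start_bit)
--   return '{0} &= (~({1} << {2})); {0} |= {3}'.format(lvalue, mask_hex, start_bit, rhs)
-- ===== Notes on version B (the rewrite author's own statement) =====
-- stated objective: simpler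
-- what changed: B never computes the mask integer: instead of A's bit-OR loop followed by hex(), it writes the hex literal of the all-ones mask directly as text (a partial-nibble digit from '','1','3','7' plus num_bits//4 'f' characters), computes the access width as max(32, start_bit+num_bits) instead of a branch, and assembles the address and the final statement each in a single format with no tmp/zero_expr staging.
import Mathlib
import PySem

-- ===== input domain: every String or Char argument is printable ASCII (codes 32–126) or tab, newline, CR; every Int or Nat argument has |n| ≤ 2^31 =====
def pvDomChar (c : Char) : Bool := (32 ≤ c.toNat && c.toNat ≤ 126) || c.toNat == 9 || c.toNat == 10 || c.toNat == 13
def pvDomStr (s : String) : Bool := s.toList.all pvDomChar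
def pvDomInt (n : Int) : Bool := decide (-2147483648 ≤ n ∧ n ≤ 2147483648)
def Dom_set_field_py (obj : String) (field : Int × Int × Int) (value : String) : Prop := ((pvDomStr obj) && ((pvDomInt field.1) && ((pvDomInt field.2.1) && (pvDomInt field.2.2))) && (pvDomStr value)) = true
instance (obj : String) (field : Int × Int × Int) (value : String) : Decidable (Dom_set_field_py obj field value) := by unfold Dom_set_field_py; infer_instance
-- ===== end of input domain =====

-- B builds the mask's hex literal directly as text (no mask integer, no bit-OR loop, no hex())
-- and assembles address and statement each in one format: simpler.

-- ===== PORT A =====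
-- hand port of Python's hex(n) for n ≥ 0 (exact there: '0x' + lowercase hex digits, no sign);
-- fuel-structured recursion (fuel = n suffices since n/16 < n for n > 0).
def pyHexDigit (n : Nat) : Char :=
  if n < 10 then Char.ofNat (48 + n) else Char.ofNat (87 + n)

def pyHexCharsAux : Nat → Nat → List Char
  | _, 0 => []
  | 0, _ + 1 => []
  | f + 1, n + 1 => pyHexCharsAux f ((n + 1) / 16) ++ [pyHexDigit ((n + 1) % 16)]

def pyHex (n : Nat) : String :=
  "0x" ++ String.ofList (if n = 0 then ['0'] else pyHexCharsAux n n)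

-- literal transliteration of A; where Python raises NameError (the name 'mask' is unbound
-- because the 0 < num_bits < 32 branch did not run) the port returns "" — excluded by Pre_.
def set_field_py (obj : String) (field : Int × Int × Int) (value : String) : String :=
  let offset := field.1
  let start_bit := field.2.1
  let num_bits := field.2.2
  let body := "((uint8_t*)(&" ++ obj ++ "))"
  let bit_length := num_bits + start_bit
  let bit_length := if bit_length ≤ 32 then 32 else bit_length
  let body :=
    if offset > 0 then
      "*((uint" ++ PySem.Int.toStr bit_length ++ "_t*)(" ++ body ++ " + " ++ PySem.Int.toStr offset ++ "))"
    else
      "*((uint" ++ PySem.Int.toStr bit_length ++ "_t*)(" ++ body ++ "))"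
  -- mask : Option Int — none means the Python name 'mask' is unbound
  let mt : Option Int × String :=
    if num_bits > 0 ∧ num_bits < 32 then
      let mask := (PySem.List.pyRange 0 num_bits 1).foldl
        (fun m i => PySem.Int.bor m ((1 : Int) <<< i.toNat)) 0
      (some mask, "(" ++ value ++ " & " ++ pyHex mask.toNat ++ ")")
    else if num_bits = 32 then (none, "(" ++ value ++ ")")
    else (none, "")
  let tmp := if start_bit > 0 then "(" ++ mt.2 ++ " << " ++ PySem.Int.toStr start_bit ++ ")" else mt.2
  match mt.1 with
  | none => ""  -- Python: NameError at hex(mask); outside Pre_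
  | some mask =>
    let zero_expr := "(~(" ++ pyHex mask.toNat ++ " << " ++ PySem.Int.toStr start_bit ++ "))"
    body ++ " &= " ++ zero_expr ++ "; " ++ body ++ " |= " ++ tmp

-- ===== PORT B =====
def set_field_py_alt (obj : String) (field : Int × Int × Int) (value : String) : String :=
  let offset := field.1
  let start_bit := field.2.1
  let num_bits := field.2.2
  let width := max 32 (start_bit + num_bits)
  let lvalue := "*((uint" ++ PySem.Int.toStr width ++ "_t*)(((uint8_t*)(&" ++ obj ++ "))"
    ++ (if offset > 0 then " + " ++ PySem.Int.toStr offset else "") ++ "))"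
  -- ('', '1', '3', '7')[num_bits % 4] : the index is always 0..3 (Python % with positive
  -- divisor), so the tuple lookup never raises; 'f' * (num_bits // 4) is '' for a
  -- negative count, matched by .toNat
  let mask_hex := "0x"
    ++ (PySem.List.pyGet? (["", "1", "3", "7"] : List String) (PySem.Int.mod num_bits 4)).getD ""
    ++ String.ofList (List.replicate (PySem.Int.floordiv num_bits 4).toNat 'f')
  let rhs := "(" ++ value ++ " & " ++ mask_hex ++ ")"
  let rhs := if start_bit > 0 then "(" ++ rhs ++ " << " ++ PySem.Int.toStr start_bit ++ ")" else rhs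
  lvalue ++ " &= (~(" ++ mask_hex ++ " << " ++ PySem.Int.toStr start_bit ++ ")); "
    ++ lvalue ++ " |= " ++ rhs

-- ===== PRECONDITION & SPEC =====
-- Pre_ excludes exactly the inputs where A raises NameError: unless 0 < num_bits < 32,
-- no branch binds 'mask' and hex(mask) raises.
def Pre_set_field_py (obj : String) (field : Int × Int × Int) (value : String) : Prop :=
  0 < field.2.2 ∧ field.2.2 < 32
instance (obj : String) (field : Int × Int × Int) (value : String) : Decidable (Pre_set_field_py obj field value) := by unfold Pre_set_field_py; infer_instance

def pvWitness_set_field_py : String × (Int × Int × Int) × String := ("x", (1, 2, 5), "v")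

def Spec_set_field_py (obj : String) (field : Int × Int × Int) (value : String) (out : String) : Prop := out = set_field_py_alt obj field value
instance (obj : String) (field : Int × Int × Int) (value : String) (out : String) : Decidable (Spec_set_field_py obj field value out) := by unfold Spec_set_field_py; infer_instance

-- ===== CLAIM =====
def Claim_equal_set_field_py : Prop := ∀ (obj : String) (field : Int × Int × Int) (value : String), Dom_set_field_py obj field value → Pre_set_field_py obj field value → Spec_set_field_py obj field value (set_field_py obj field value)

-- ===== LEMMAS AND PROOFS =====

-- the hex() of A's loop-built mask equals B's directly written hex literal, for 0 < n < 32
theorem maskHex_eq (n : Int) (h1 : 0 < n) (h2 : n < 32) :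
    pyHex ((PySem.List.pyRange 0 n 1).foldl
        (fun m i => PySem.Int.bor m ((1 : Int) <<< i.toNat)) 0).toNat
      = "0x" ++ (PySem.List.pyGet? (["", "1", "3", "7"] : List String) (PySem.Int.mod n 4)).getD ""
        ++ String.ofList (List.replicate (PySem.Int.floordiv n 4).toNat 'f') := by
  interval_cases n <;> decide

theorem width_eq (a b : Int) : (max 32 (b + a) : Int) = if a + b ≤ 32 then 32 else a + b := by
  split <;> omega

-- ===== VERDICT =====
theorem set_field_py_spec : Claim_equal_set_field_py := by
  intro obj ⟨off, sb, nb⟩ value _ hpre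
  obtain ⟨h1, h2⟩ := hpre
  unfold Spec_set_field_py set_field_py set_field_py_alt
  simp only [width_eq nb sb]
  have hbr : 0 < nb ∧ nb < 32 := ⟨h1, h2⟩
  simp only [hbr, if_pos, and_self, gt_iff_lt]
  rw [maskHex_eq nb h1 h2]
  rw [← String.toList_inj]
  by_cases ho : off > 0 <;> by_cases hs : sb > 0 <;>
    simp [ho, hs, List.append_assoc]
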